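-- pv_equiv track=rewrite | github.com/hxse/ccxt-proxy2 | src/cache_tool/cache_utils.py | get_chunk_slices
-- ===== SOURCE A (Python) =====
-- from typing import List, Tuple, Any
--
-- def get_chunk_slices(
--     total_rows: int, cache_size: int, reverse: bool = False
-- ) -> List[Tuple[int, int]]:
--     """
--     计算正向或反向写入时每个文件块的切片范围。
--
--     Args:
--         total_rows (int): 总数据行数。
--         cache_size (int): 每个缓存文件存储的数据行数。
--         forward (bool): 写入方向。True 为正向，False 为反向。
--
--     Returns:
--         List[Tuple[int, int]]: 包含每个文件块切片范围 (start_index, end_index) 的列表。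
--     """
--     if total_rows <= 0 or cache_size <= 0:
--         return []
--
--     if cache_size == 1:
--         # 特殊处理 cache_size=1 的情况
--         slices = [(i, i + 1) for i in range(total_rows)]
--         # 对于正向和反向，切片相同，无需去除任何切片
--         return slices
--
--     if not reverse:
--         step = cache_size - 1
--         slices = [
--             (start, min(start + cache_size, total_rows))
--             for start in range(0, total_rows, step)
--         ]
--         # 去除最后一个长度为1的切片（当切片数大于1时）
--         if len(slices) > 1 and slices[-1][1] - slices[-1][0] == 1:
--             slices = slices[:-1]
--         return slices
--     else:
--         step = cache_size - 1
--         first_chunk_size = (total_rows - 1) % step + 1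
--
--         # 确定剩余切片的数量
--         remaining_rows = total_rows - first_chunk_size
--         num_remaining_chunks = remaining_rows // step
--         if remaining_rows % step > 0:
--             num_remaining_chunks += 1
--
--         # 构建第一个切片
--         first_slice = [(0, first_chunk_size)]
--
--         # 构建剩余切片
--         remaining_slices = [
--             (
--                 first_chunk_size - 1 + i * step,
--                 min(first_chunk_size - 1 + i * step + cache_size, total_rows),
--             )
--             for i in range(num_remaining_chunks)
--         ]
--
--         # 合并切片
--         slices = first_slice + remaining_slices
--
--         # 去除第一个长度为1的切片（当切片数大于1时）
--         if len(slices) > 1 and slices[0][1] - slices[0][0] == 1: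
--             slices = slices[1:]
--
--         return slices
-- ===== SOURCE B (Python) =====
-- def _forward_slices(total_rows, cache_size):
--     step = cache_size - 1
--     fwd = [(s, min(s + cache_size, total_rows)) for s in range(0, total_rows, step)]
--     if len(fwd) > 1 and fwd[-1][1] - fwd[-1][0] == 1:
--         fwd = fwd[:-1]
--     return fwd
--
--
-- def get_chunk_slices(total_rows, cache_size, reverse=False):
--     if total_rows <= 0 or cache_size <= 0:
--         return []
--     if cache_size == 1:
--         return [(i, i + 1) for i in range(total_rows)]
--     fwd = _forward_slices(total_rows, cache_size)
--     if reverse: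
--         return [(total_rows - e, total_rows - s) for (s, e) in reversed(fwd)]
--     return fwd
-- ===== Notes on version B (the rewrite author's own statement) =====
-- stated objective: simpler
-- what changed: The reverse branch no longer derives chunk boundaries by separate modular arithmetic (first_chunk_size, num_remaining_chunks); B computes the forward slice list once (shared helper) and, for reverse, mirrors each pair (s,e) to (total_rows-e, total_rows-s) in reversed order.
import Mathlib
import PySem

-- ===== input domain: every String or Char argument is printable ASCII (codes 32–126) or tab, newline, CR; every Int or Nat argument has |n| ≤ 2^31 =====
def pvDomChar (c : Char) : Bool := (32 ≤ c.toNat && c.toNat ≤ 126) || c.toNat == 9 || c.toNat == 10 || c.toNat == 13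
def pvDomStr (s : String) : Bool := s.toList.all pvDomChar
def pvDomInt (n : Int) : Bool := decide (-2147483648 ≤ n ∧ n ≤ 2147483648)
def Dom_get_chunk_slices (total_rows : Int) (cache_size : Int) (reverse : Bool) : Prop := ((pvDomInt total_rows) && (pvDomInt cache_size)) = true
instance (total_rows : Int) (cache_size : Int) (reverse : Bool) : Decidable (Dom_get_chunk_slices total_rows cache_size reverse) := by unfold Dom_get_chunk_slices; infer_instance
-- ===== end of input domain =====

-- B replaces A's modular-arithmetic reverse construction by computing the forward
-- slices once and mirroring them; objective: simpler (same asymptotic cost).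

-- ===== PORT A =====
def get_chunk_slices (total_rows : Int) (cache_size : Int) (reverse : Bool) : List (Int × Int) :=
  if total_rows ≤ 0 ∨ cache_size ≤ 0 then []
  else if cache_size = 1 then
    (PySem.List.pyRange 0 total_rows 1).map (fun i => (i, i + 1))
  else if !reverse then
    let step := cache_size - 1
    let slices := (PySem.List.pyRange 0 total_rows step).map
      (fun start => (start, min (start + cache_size) total_rows))
    if 1 < slices.length ∧
        (PySem.List.pyGetD slices (-1) (0, 0)).2 - (PySem.List.pyGetD slices (-1) (0, 0)).1 = 1 then
      PySem.List.slice slices none (some (-1))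
    else slices
  else
    let step := cache_size - 1
    let first_chunk_size := PySem.Int.mod (total_rows - 1) step + 1
    let remaining_rows := total_rows - first_chunk_size
    let num_remaining_chunks :=
      if 0 < PySem.Int.mod remaining_rows step then PySem.Int.floordiv remaining_rows step + 1
      else PySem.Int.floordiv remaining_rows step
    let first_slice : List (Int × Int) := [(0, first_chunk_size)]
    let remaining_slices := (PySem.List.pyRange 0 num_remaining_chunks 1).map
      (fun i => (first_chunk_size - 1 + i * step,
                 min (first_chunk_size - 1 + i * step + cache_size) total_rows))
    let slices := first_slice ++ remaining_slices
    if 1 < slices.length ∧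
        (PySem.List.pyGetD slices 0 (0, 0)).2 - (PySem.List.pyGetD slices 0 (0, 0)).1 = 1 then
      PySem.List.slice slices (some 1) none
    else slices

-- ===== PORT B =====
def pvForwardSlices (total_rows : Int) (cache_size : Int) : List (Int × Int) :=
  let step := cache_size - 1
  let fwd := (PySem.List.pyRange 0 total_rows step).map
    (fun s => (s, min (s + cache_size) total_rows))
  if 1 < fwd.length ∧
      (PySem.List.pyGetD fwd (-1) (0, 0)).2 - (PySem.List.pyGetD fwd (-1) (0, 0)).1 = 1 then
    PySem.List.slice fwd none (some (-1))
  else fwd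

def get_chunk_slices_alt (total_rows : Int) (cache_size : Int) (reverse : Bool) : List (Int × Int) :=
  if total_rows ≤ 0 ∨ cache_size ≤ 0 then []
  else if cache_size = 1 then
    (PySem.List.pyRange 0 total_rows 1).map (fun i => (i, i + 1))
  else
    let fwd := pvForwardSlices total_rows cache_size
    if reverse then fwd.reverse.map (fun p => (total_rows - p.2, total_rows - p.1))
    else fwd

-- ===== PRECONDITION & SPEC =====
def Spec_get_chunk_slices (total_rows : Int) (cache_size : Int) (reverse : Bool) (out : List (Int × Int)) : Prop := out = get_chunk_slices_alt total_rows cache_size reverse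
instance (total_rows : Int) (cache_size : Int) (reverse : Bool) (out : List (Int × Int)) : Decidable (Spec_get_chunk_slices total_rows cache_size reverse out) := by unfold Spec_get_chunk_slices; infer_instance

-- ===== CLAIM (what is proved, stated in full; the proofs are below) =====
def Claim_equal_get_chunk_slices : Prop := ∀ (total_rows : Int) (cache_size : Int) (reverse : Bool), Dom_get_chunk_slices total_rows cache_size reverse → Spec_get_chunk_slices total_rows cache_size reverse (get_chunk_slices total_rows cache_size reverse)

-- ===== LEMMAS AND PROOFS =====

theorem pvGetD_cons_zero {α : Type} (x : α) (l : List α) (d : α) :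
    PySem.List.pyGetD (x :: l) 0 d = x := by
  simp [PySem.List.pyGetD, PySem.List.pyGet?, PySem.List.pyIdx?]

theorem pvGetD_concat_neg_one {α : Type} (l : List α) (x d : α) :
    PySem.List.pyGetD (l ++ [x]) (-1) d = x := by
  simp [PySem.List.pyGetD, PySem.List.pyGet?, PySem.List.pyIdx?]

theorem pv_rev_map_range {α β : Type} (n : Nat) (f : Nat → α) (g : α → β) (h : Nat → β)
    (hp : ∀ j, j < n → g (f (n - 1 - j)) = h j) :
    (((List.range n).map f).reverse).map g = (List.range n).map h := by
  apply List.ext_getElem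
  · simp
  · intro j h1 h2
    simp only [List.getElem_map, List.getElem_reverse, List.length_map, List.length_range, List.getElem_range]
    exact hp j (by simpa using h2)

theorem pv_reflect_core (T c k q r : Int) (n j : Nat)
    (hk : 1 ≤ k) (hc : c = k + 1) (hT : T = q * k + r + 1)
    (hr0 : 0 ≤ r) (hrk : r < k) (hnq : (n : Int) = q) (hj : j < n) :
    (T - min (k * ((n - 1 - j : Nat) : Int) + c) T, T - k * ((n - 1 - j : Nat) : Int))
      = (r + (j : Int) * k, min (r + (j : Int) * k + c) T) := by
  have hiI : ((n - 1 - j : Nat) : Int) = q - 1 - (j : Int) := by omega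
  have hi1 : ((n - 1 - j : Nat) : Int) + 1 ≤ q := by omega
  have hj1 : (j : Int) + 1 ≤ q := by omega
  have hm1 : k * (((n - 1 - j : Nat) : Int) + 1) ≤ k * q :=
    mul_le_mul_of_nonneg_left hi1 (by omega)
  have hm2 : k * ((j : Int) + 1) ≤ k * q := mul_le_mul_of_nonneg_left hj1 (by omega)
  have cqk : q * k = k * q := mul_comm _ _
  have cjk : (j : Int) * k = k * (j : Int) := mul_comm _ _
  have e1 : k * (((n - 1 - j : Nat) : Int) + 1) = k * ((n - 1 - j : Nat) : Int) + k := by ring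
  have e2 : k * ((j : Int) + 1) = k * (j : Int) + k := by ring
  have hminA : k * ((n - 1 - j : Nat) : Int) + c ≤ T := by linarith
  have hminB : r + (j : Int) * k + c ≤ T := by linarith
  have hik : k * ((n - 1 - j : Nat) : Int) = k * q - k - k * (j : Int) := by rw [hiI]; ring
  rw [min_eq_left hminA, min_eq_left hminB]
  simp only [Prod.mk.injEq]
  constructor <;> linarith

theorem pv_fwd_eq (T c : Int) (hg : ¬(T ≤ 0 ∨ c ≤ 0)) (hc1 : ¬(c = 1)) :
    get_chunk_slices T c false = get_chunk_slices_alt T c false := by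
  rw [get_chunk_slices, get_chunk_slices_alt, pvForwardSlices]
  simp only [if_neg hg, if_neg hc1, Bool.not_false, if_true, Bool.false_eq_true, if_false]

theorem pv_rev_eq (T c : Int) (hT : 0 < T) (hc : 2 ≤ c) :
    get_chunk_slices T c true = get_chunk_slices_alt T c true := by
  have hg : ¬(T ≤ 0 ∨ c ≤ 0) := by omega
  have hc1 : ¬(c = 1) := by omega
  set k := c - 1 with hkdef
  have hk1 : 1 ≤ k := by omega
  have hk0 : k ≠ 0 := by omega
  set q := (T - 1) / k with hqdef
  set r := (T - 1) % k with hrdef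
  have hr0 : 0 ≤ r := Int.emod_nonneg _ hk0
  have hrk : r < k := Int.emod_lt_of_pos _ (by omega)
  have hTqr : T = q * k + r + 1 := by
    have h := Int.ediv_add_emod (T - 1) k
    have : k * q = q * k := mul_comm _ _
    rw [← hqdef, ← hrdef] at h
    linarith
  have hq0 : 0 ≤ q := Int.ediv_nonneg (by omega) (by omega)
  set n := q.toNat with hndef
  have hnq : (n : Int) = q := Int.toNat_of_nonneg hq0
  have hcqk : q * k = k * q := mul_comm _ _
  -- abbreviations
  set Bh : Nat → Int × Int := fun i => (k * (i : Int), min (k * (i : Int) + c) T) with hBh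
  set Af : Nat → Int × Int := fun i => (r + (i : Int) * k, min (r + (i : Int) * k + c) T) with hAf
  set refl : Int × Int → Int × Int := fun p => (T - p.2, T - p.1) with hrefl
  -- B side: the forward list
  have hqmin : min (k * q + c) T = T := min_eq_right (by linarith)
  have hBhn : Bh n = (k * q, T) := by rw [hBh]; simp only [hnq, hqmin]
  have hcount : ((T - 0 + k - 1) / k).toNat = n + 1 := by
    have h1 : T - 0 + k - 1 = r + (q + 1) * k := by linarith
    have h2 : (r + (q + 1) * k) / k = r / k + (q + 1) := Int.add_mul_ediv_right _ _ hk0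
    have h3 : r / k = 0 := Int.ediv_eq_zero_of_lt hr0 hrk
    rw [h1, h2, h3]
    omega
  have hrange : PySem.List.pyRange 0 T k = (List.range (n + 1)).map (fun i : Nat => k * (i : Int)) := by
    rw [PySem.List.pyRange_of_pos 0 T (by omega), if_pos hT, hcount]
    simp only [zero_add]
  have hfwd0 : (PySem.List.pyRange 0 T k).map (fun s => (s, min (s + c) T))
      = (List.range n).map Bh ++ [Bh n] := by
    rw [hrange, List.map_map, List.range_succ, List.map_append]
    rfl
  have hlast : PySem.List.pyGetD ((List.range n).map Bh ++ [Bh n]) (-1) (0, 0) = Bh n :=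
    pvGetD_concat_neg_one _ _ _
  have hfwd : pvForwardSlices T c =
      if 0 < n ∧ r = 0 then (List.range n).map Bh else (List.range n).map Bh ++ [Bh n] := by
    rw [pvForwardSlices]
    simp only [← hkdef, hfwd0]
    rw [hlast]
    have hsub : (Bh n).2 - (Bh n).1 = r + 1 := by rw [hBhn]; show T - k * q = r + 1; linarith
    rw [hsub]
    have hlen2 : ((List.range n).map Bh ++ [Bh n]).length = n + 1 := by simp
    rw [hlen2]
    by_cases hcond : 0 < n ∧ r = 0
    · rw [if_pos (show 1 < n + 1 ∧ r + 1 = 1 by omega), if_pos hcond,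
        PySem.List.slice_to_neg_one, List.dropLast_concat]
    · rw [if_neg (show ¬(1 < n + 1 ∧ r + 1 = 1) by omega), if_neg hcond]
  -- A side
  have hfmod : PySem.Int.mod (T - 1) k = r := by
    rw [PySem.Int.mod, Int.fmod_eq_emod, if_pos (Or.inl (by omega))]
    omega
  have hrem : T - (r + 1) = q * k := by linarith
  have hmod0 : PySem.Int.mod (q * k) k = 0 := by
    rw [PySem.Int.mod, Int.fmod_eq_emod, if_pos (Or.inl (by omega))]
    simp [Int.mul_emod_left]
  have hfdiv : PySem.Int.floordiv (q * k) k = q := by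
    rw [PySem.Int.floordiv, Int.fdiv_eq_ediv, if_pos (Or.inl (by omega))]
    rw [Int.mul_ediv_cancel _ hk0]
    ring
  have hrangeq : PySem.List.pyRange 0 q 1 = (List.range n).map (fun i : Nat => (i : Int)) := by
    rw [PySem.List.pyRange_one]
    simp only [sub_zero, zero_add]
    rw [← hndef]
  have hAfull : (PySem.List.pyRange 0 q 1).map
        (fun i => (r + 1 - 1 + i * k, min (r + 1 - 1 + i * k + c) T))
      = (List.range n).map Af := by
    rw [hrangeq, List.map_map]
    congr 1
    funext i
    show (r + 1 - 1 + (i : Int) * k, min (r + 1 - 1 + (i : Int) * k + c) T) = Af i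
    rw [hAf]
    have hrr : r + 1 - 1 = r := by ring
    rw [hrr]
  have hA : get_chunk_slices T c true =
      if 0 < n ∧ r = 0 then (List.range n).map Af
      else ((0 : Int), r + 1) :: (List.range n).map Af := by
    rw [get_chunk_slices]
    simp only [if_neg hg, if_neg hc1, Bool.not_true, Bool.false_eq_true, if_false, ← hkdef,
      hfmod, hrem, hmod0, hfdiv]
    rw [if_neg (lt_irrefl (0 : Int))]
    rw [hAfull]
    rw [List.singleton_append, pvGetD_cons_zero]
    have hlen2 : (((0 : Int), r + 1) :: (List.range n).map Af).length = n + 1 := by simp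
    rw [hlen2]
    have hsub : ((0 : Int), r + 1).2 - ((0 : Int), r + 1).1 = r + 1 := by show r + 1 - 0 = r + 1; ring
    rw [hsub]
    by_cases hcond : 0 < n ∧ r = 0
    · rw [if_pos (show 1 < n + 1 ∧ r + 1 = 1 by omega), if_pos hcond,
        PySem.List.slice_from_one, List.tail_cons]
    · rw [if_neg (show ¬(1 < n + 1 ∧ r + 1 = 1) by omega), if_neg hcond]
  -- the mirrored tail
  have htail : (((List.range n).map Bh).reverse).map refl = (List.range n).map Af := by
    apply pv_rev_map_range
    intro j hj
    exact pv_reflect_core T c k q r n j hk1 (by omega) hTqr hr0 hrk hnq hj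
  -- assemble
  have hB : get_chunk_slices_alt T c true = (pvForwardSlices T c).reverse.map refl := by
    rw [get_chunk_slices_alt]
    simp only [if_neg hg, if_neg hc1, if_true]
    rfl
  rw [hA, hB, hfwd]
  by_cases hcond : 0 < n ∧ r = 0
  · rw [if_pos hcond, if_pos hcond, htail]
  · rw [if_neg hcond, if_neg hcond]
    rw [List.reverse_append, List.reverse_singleton, List.singleton_append, List.map_cons, htail]
    have hhd : refl (Bh n) = ((0 : Int), r + 1) := by
      rw [hBhn, hrefl]
      show ((T - T : Int), T - k * q) = ((0 : Int), r + 1)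
      simp only [Prod.mk.injEq]
      constructor <;> linarith
    rw [hhd]

-- ===== VERDICT (by name: the statement is the Claim_ definition above) =====
theorem get_chunk_slices_spec : Claim_equal_get_chunk_slices := by
  intro T c rev hDom
  unfold Spec_get_chunk_slices
  by_cases hg : T ≤ 0 ∨ c ≤ 0
  · rw [get_chunk_slices, get_chunk_slices_alt, if_pos hg, if_pos hg]
  · by_cases hc1 : c = 1
    · rw [get_chunk_slices, get_chunk_slices_alt, if_neg hg, if_neg hg, if_pos hc1, if_pos hc1]
    · cases rev
      · exact pv_fwd_eq T c hg hc1
      · exact pv_rev_eq T c (by omega) (by omega)
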